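-- pv_equiv track=rewrite | github.com/edt-yxz-zzd/python3_src | nn_ns/math_nn/numbers/backup20180417/subfactorial_more.py | subfactorials
-- ===== SOURCE A (Python) =====
-- def subfactorials(n):
--     assert n>=0
--
--     # subfactorial[-1] = anything
--     pre_subfactorial = 0
--
--     ls = []
--     sign = -1
--     for k in range(n):
--         sign = -sign
--         curr_subfactorial = k*pre_subfactorial + sign
--         ls.append(curr_subfactorial)
--
--         pre_subfactorial = curr_subfactorial
--
--     return ls
-- ===== SOURCE B (Python) =====
-- def subfactorials(n):
--     if n <= 0:
--         return []
--     ls = [1]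
--     a, b = 0, 1
--     k = 1
--     while k < n:
--         ls.append(a)
--         a, b = k * (a + b), a
--         k += 1
--     return ls
-- ===== Notes on version B (the rewrite author's own statement) =====
-- stated objective: alternative
-- what changed: B uses the two-term recurrence D(k+1)=k*(D(k)+D(k-1)) with an explicit [1] base case and a while loop sliding a two-value window, instead of A's alternating-sign one-term recurrence D(k)=k*D(k-1)+(-1)^k threading a sign variable through a for loop.
import Mathlib
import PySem

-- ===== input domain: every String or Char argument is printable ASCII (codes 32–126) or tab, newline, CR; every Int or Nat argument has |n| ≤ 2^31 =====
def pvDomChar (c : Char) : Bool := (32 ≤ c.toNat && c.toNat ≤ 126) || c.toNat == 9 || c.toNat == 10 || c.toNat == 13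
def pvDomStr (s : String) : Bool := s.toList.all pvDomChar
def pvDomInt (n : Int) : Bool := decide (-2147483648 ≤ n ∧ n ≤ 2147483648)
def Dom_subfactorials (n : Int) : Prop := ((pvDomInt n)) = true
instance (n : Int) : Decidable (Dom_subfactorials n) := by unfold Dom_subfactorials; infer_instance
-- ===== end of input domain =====

-- B lists the first n subfactorials by the two-term recurrence D(k+1)=k*(D(k)+D(k-1))
-- with an explicit base case and a while loop sliding a two-value window, instead of A's
-- alternating-sign one-term recurrence with a sign variable (objective: alternative).

-- ===== PORT A =====
-- loop state: (pre_subfactorial, sign, ls)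
def subfactorials (n : Int) : List Int :=
  ((PySem.List.pyRange 0 n 1).foldl
    (fun (st : Int × Int × List Int) k =>
      let sign := -st.2.1
      let curr := k * st.1 + sign
      (curr, sign, st.2.2 ++ [curr]))
    (0, -1, [])).2.2

-- ===== PORT B =====
-- Python's `while k < n` loop, ported as recursion on the remaining iteration
-- count (n - k), which the loop decreases by one each pass; k, a, b stay Int.
def subfactorialsLoop : Nat → Int → Int → Int → List Int → List Int
  | 0, _, _, _, ls => ls
  | (fuel+1), k, a, b, ls => subfactorialsLoop fuel (k+1) (k * (a + b)) a (ls ++ [a])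

def subfactorials_alt (n : Int) : List Int :=
  if n ≤ 0 then []
  else subfactorialsLoop (n - 1).toNat 1 0 1 [1]

-- ===== PRECONDITION & SPEC =====
-- A's `assert n>=0` raises AssertionError for negative n.
def Pre_subfactorials (n : Int) : Prop := 0 ≤ n
instance (n : Int) : Decidable (Pre_subfactorials n) := by unfold Pre_subfactorials; infer_instance
def pvWitness_subfactorials : Int := (5)
def Spec_subfactorials (n : Int) (out : List Int) : Prop := out = subfactorials_alt n
instance (n : Int) (out : List Int) : Decidable (Spec_subfactorials n out) := by unfold Spec_subfactorials; infer_instance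

-- ===== CLAIM (what is proved, stated in full; the proofs are below) =====
def Claim_equal_subfactorials : Prop := ∀ (n : Int), Dom_subfactorials n → Pre_subfactorials n → Spec_subfactorials n (subfactorials n)

-- ===== LEMMAS AND PROOFS =====

/-- Reference sequence: the k-th subfactorial. -/
def subD : Nat → Int
  | 0 => 1
  | (k+1) => ((k : Int) + 1) * subD k + (-1 : Int) ^ (k + 1)

/-- The two-term recurrence B uses. -/
lemma subD_two_term (j : Nat) : subD (j+2) = ((j : Int)+1) * (subD (j+1) + subD j) := by
  rw [show subD (j+2) = ((j:Int)+1+1) * subD (j+1) + (-1:Int)^(j+2) from rfl,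
      show subD (j+1) = ((j:Int)+1) * subD j + (-1:Int)^(j+1) from rfl]
  ring

/-- A's `pre_subfactorial` value before iteration m. -/
def preV : Nat → Int
  | 0 => 0
  | (m+1) => subD m

lemma A_inv (m : Nat) :
    ((PySem.List.pyRange 0 m 1).foldl
      (fun (st : Int × Int × List Int) k =>
        let sign := -st.2.1
        let curr := k * st.1 + sign
        (curr, sign, st.2.2 ++ [curr]))
      (0, -1, []))
    = (preV m, -(-1 : Int)^m, (List.range m).map subD) := by
  induction m with
  | zero => simp [PySem.List.pyRange_one_eq_nil, preV]
  | succ m ih =>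
    have hr : PySem.List.pyRange 0 (↑(m+1)) 1 = PySem.List.pyRange 0 m 1 ++ [(m : Int)] := by
      push_cast
      exact PySem.List.pyRange_one_succ_right (by exact_mod_cast Nat.zero_le m)
    rw [hr, List.foldl_append, ih]
    have hcurr : (m : Int) * preV m + (-1:Int)^m = subD m := by
      cases m with
      | zero => simp [preV, subD]
      | succ s => rw [preV, subD]; push_cast; ring
    simp only [List.foldl_cons, List.foldl_nil, List.range_succ, List.map_append, List.map_cons,
      List.map_nil, neg_neg]
    rw [show -(-1:Int)^(m+1) = (-1:Int)^m by rw [pow_succ]; ring, hcurr]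
    rfl

lemma B_loop_inv (f : Nat) : ∀ (m : Nat),
    subfactorialsLoop f ((m : Int)+1) (subD (m+1)) (subD m) ((List.range (m+1)).map subD)
      = (List.range (m+1+f)).map subD := by
  induction f with
  | zero => intro m; simp [subfactorialsLoop]
  | succ f ih =>
    intro m
    rw [subfactorialsLoop]
    have hc : ((m : Int)+1) * (subD (m+1) + subD m) = subD (m+2) := (subD_two_term m).symm
    have hls : (List.range (m+1)).map subD ++ [subD (m+1)] = (List.range (m+2)).map subD := by
      simp [List.range_succ]
    rw [hc, hls]
    have h2 := ih (m+1)
    have e1 : ((m+1 : Nat) : Int) + 1 = (m:Int)+1+1 := by push_cast; ring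
    have e2 : (m+1)+1 = m+2 := rfl
    rw [e1, e2] at h2
    rw [h2, show m+2+f = m+1+(f+1) by omega]

lemma B_eq (m : Nat) : subfactorials_alt m = (List.range m).map subD := by
  unfold subfactorials_alt
  match m with
  | 0 => simp
  | (j+1) =>
    have h0 : ¬ ((j:Int)+1 ≤ 0) := by omega
    push_cast
    rw [if_neg h0]
    have hfuel : ((j:Int)+1-1).toNat = j := by omega
    rw [hfuel]
    have h := B_loop_inv j 0
    norm_num [show subD 1 = 0 by simp [subD], show subD 0 = 1 from rfl,
      show (List.range 1).map subD = [1] from rfl] at h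
    rw [h, Nat.add_comm 1 j]

-- ===== VERDICT (by name: the statement is the Claim_ definition above) =====
theorem subfactorials_spec : Claim_equal_subfactorials := by
  intro n _ hn
  have hm : n = ((n.toNat : Nat) : Int) := (Int.toNat_of_nonneg hn).symm
  unfold Spec_subfactorials
  rw [hm, B_eq]
  unfold subfactorials
  rw [A_inv]
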